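-- pv_equiv track=rewrite | github.com/es7s/kolombos | pytermor/render.py | distribute_padded
-- ===== SOURCE A (Python) =====
-- from typing import List, Sized, Any
--
-- def distribute_padded(values: List, max_len: int, pad_before: bool = False,
--                       pad_after: bool = False, ) -> str:
--     if pad_before:
--         values.insert(0, '')
--     if pad_after:
--         values.append('')
--
--     values_amount = len(values)
--     gapes_amount = values_amount - 1
--     values_len = sum(len(v) for v in values)
--     spaces_amount = max_len - values_len
--     if spaces_amount < gapes_amount:
--         raise ValueError(f'There is not enough space for all values with padding')
--
--     result = ''
--     for value_idx, value in enumerate(values):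
--         gape_len = spaces_amount // (gapes_amount or 1)  # for last value
--         result += value + ' ' * gape_len
--         gapes_amount -= 1
--         spaces_amount -= gape_len
--
--     return result
-- ===== SOURCE B (Python) =====
-- def distribute_padded(values, max_len, pad_before=False, pad_after=False):
--     if pad_before:
--         values.insert(0, '')
--     if pad_after:
--         values.append('')
--
--     gapes_amount = len(values) - 1
--     spaces_amount = max_len - sum(len(v) for v in values)
--     if spaces_amount < gapes_amount:
--         raise ValueError(f'There is not enough space for all values with padding')
--
--     if gapes_amount <= 0:
--         # zero or one value: the lone value (if any) gets all spaces trailing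
--         gaps = [spaces_amount]
--     else:
--         base, rem = divmod(spaces_amount, gapes_amount)
--         gaps = [base + (1 if i >= gapes_amount - rem else 0)
--                 for i in range(gapes_amount)] + [0]
--     return ''.join(v + ' ' * g for v, g in zip(values, gaps))
-- ===== Notes on version B (the rewrite author's own statement) =====
-- stated objective: alternative
-- what changed: Replaces A's running loop (re-dividing the remaining spaces by the remaining gap count at every value) with a closed-form divmod: one gap list [base (+1 for the last rem inter-value gaps), then 0] built once and joined with the values in a single pass.
import Mathlib
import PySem

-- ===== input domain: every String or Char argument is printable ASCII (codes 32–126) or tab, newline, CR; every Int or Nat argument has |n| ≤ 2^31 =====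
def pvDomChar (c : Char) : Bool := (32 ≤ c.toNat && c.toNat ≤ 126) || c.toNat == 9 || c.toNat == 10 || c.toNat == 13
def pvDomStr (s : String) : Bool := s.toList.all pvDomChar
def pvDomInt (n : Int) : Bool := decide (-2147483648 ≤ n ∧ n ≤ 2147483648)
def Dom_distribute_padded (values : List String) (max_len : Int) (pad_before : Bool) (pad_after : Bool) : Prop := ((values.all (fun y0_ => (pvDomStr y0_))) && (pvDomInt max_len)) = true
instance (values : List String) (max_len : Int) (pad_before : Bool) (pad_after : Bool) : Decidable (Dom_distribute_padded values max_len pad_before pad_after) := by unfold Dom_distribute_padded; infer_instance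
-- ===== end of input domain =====

-- B replaces A's running re-division loop by a closed-form divmod gap list, joined in one pass
-- (equal cost; the equivalence is about the RETURN value — Python A mutates `values` in place
-- via insert/append, and Python B performs the same mutation).

-- ===== PORT A =====
-- str accumulation is ported on code points (List Char), String.mk at the end (exact for str concat).
def distribute_padded (values : List String) (max_len : Int) (pad_before : Bool) (pad_after : Bool) : String :=
  let values := if pad_before then "" :: values else values
  let values := if pad_after then values ++ [""] else values
  let values_amount : Int := PySem.List.len values
  let gapes_amount : Int := values_amount - 1
  let values_len : Int := (values.map (fun v => PySem.Str.len v)).sum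
  let spaces_amount : Int := max_len - values_len
  -- inputs with spaces_amount < gapes_amount raise ValueError; excluded by Pre_
  let fin := (PySem.List.enumerate values 0).foldl
    (fun (st : List Char × Int × Int) (vp : Int × String) =>
      (st.1 ++ vp.2.toList ++
         List.replicate (PySem.Int.floordiv st.2.2 (if st.2.1 == 0 then 1 else st.2.1)).toNat ' ',
       st.2.1 - 1,
       st.2.2 - PySem.Int.floordiv st.2.2 (if st.2.1 == 0 then 1 else st.2.1)))
    ([], gapes_amount, spaces_amount)
  String.mk fin.1

-- ===== PORT B =====
def distribute_padded_alt (values : List String) (max_len : Int) (pad_before : Bool) (pad_after : Bool) : String :=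
  let values := if pad_before then "" :: values else values
  let values := if pad_after then values ++ [""] else values
  let gapes_amount : Int := PySem.List.len values - 1
  let spaces_amount : Int := max_len - (values.map (fun v => PySem.Str.len v)).sum
  -- inputs with spaces_amount < gapes_amount raise ValueError; excluded by Pre_
  let gaps : List Int :=
    if gapes_amount ≤ 0 then [spaces_amount]
    else ((PySem.List.pyRange 0 gapes_amount 1).map
            (fun i => PySem.Int.floordiv spaces_amount gapes_amount +
                      if gapes_amount - PySem.Int.mod spaces_amount gapes_amount ≤ i then 1 else 0)) ++ [0]
  String.mk ((values.zip gaps).flatMap (fun p => p.1.toList ++ List.replicate p.2.toNat ' '))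

-- ===== PRECONDITION & SPEC =====
-- Pre_ excludes exactly the inputs on which A raises ValueError ('not enough space'):
-- after optional padding, the spare space max_len - Σ len(v) must be at least (#values - 1).
def Pre_distribute_padded (values : List String) (max_len : Int) (pad_before : Bool) (pad_after : Bool) : Prop :=
  ((values.length : Int) + (if pad_before then 1 else 0) + (if pad_after then 1 else 0)) - 1
    ≤ max_len - (values.map (fun v => PySem.Str.len v)).sum
instance (values : List String) (max_len : Int) (pad_before : Bool) (pad_after : Bool) : Decidable (Pre_distribute_padded values max_len pad_before pad_after) := by unfold Pre_distribute_padded; infer_instance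
def pvWitness_distribute_padded : List String × Int × Bool × Bool := (["ab", "c"], 8, false, true)
def Spec_distribute_padded (values : List String) (max_len : Int) (pad_before : Bool) (pad_after : Bool) (out : String) : Prop := out = distribute_padded_alt values max_len pad_before pad_after
instance (values : List String) (max_len : Int) (pad_before : Bool) (pad_after : Bool) (out : String) : Decidable (Spec_distribute_padded values max_len pad_before pad_after out) := by unfold Spec_distribute_padded; infer_instance

-- ===== CLAIM (what is proved, stated in full; the proofs are below) =====
def Claim_equal_distribute_padded : Prop := ∀ (values : List String) (max_len : Int) (pad_before : Bool) (pad_after : Bool), Dom_distribute_padded values max_len pad_before pad_after → Pre_distribute_padded values max_len pad_before pad_after → Spec_distribute_padded values max_len pad_before pad_after (distribute_padded values max_len pad_before pad_after)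

-- ===== LEMMAS AND PROOFS =====

/-- The body of A's loop, as a structural recursion producing the appended suffix. -/
def runA : List String → Int → Int → List Char
  | [], _, _ => []
  | v :: rest, g, s =>
      v.toList ++ List.replicate (PySem.Int.floordiv s (if g == 0 then 1 else g)).toNat ' ' ++
        runA rest (g - 1) (s - PySem.Int.floordiv s (if g == 0 then 1 else g))

lemma foldl_enum_runA (vs : List String) : ∀ (k : Int) (acc : List Char) (g s : Int),
    ((PySem.List.enumerate vs k).foldl
      (fun (st : List Char × Int × Int) (vp : Int × String) =>
        (st.1 ++ vp.2.toList ++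
           List.replicate (PySem.Int.floordiv st.2.2 (if st.2.1 == 0 then 1 else st.2.1)).toNat ' ',
         st.2.1 - 1,
         st.2.2 - PySem.Int.floordiv st.2.2 (if st.2.1 == 0 then 1 else st.2.1)))
      (acc, g, s)).1 = acc ++ runA vs g s := by
  induction vs with
  | nil => intro k acc g s; simp [PySem.List.enumerate, runA]
  | cons v rest ih =>
      intro k acc g s
      simp only [PySem.List.enumerate, List.foldl_cons, runA]
      rw [ih]
      simp

/-- B's gap list as a function of (gapes, spaces). -/
def gapsB (g s : Int) : List Int :=
  if g ≤ 0 then [s]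
  else ((PySem.List.pyRange 0 g 1).map
          (fun i => PySem.Int.floordiv s g + if g - PySem.Int.mod s g ≤ i then 1 else 0)) ++ [0]

/-- B's join, as a structural recursion. -/
def joinB : List String → List Int → List Char
  | v :: vs, gap :: gaps => v.toList ++ List.replicate gap.toNat ' ' ++ joinB vs gaps
  | _, _ => []

lemma flatMap_zip_joinB (vs : List String) : ∀ gaps : List Int,
    (vs.zip gaps).flatMap (fun p => p.1.toList ++ List.replicate p.2.toNat ' ') = joinB vs gaps := by
  induction vs with
  | nil => intro gaps; simp [joinB]
  | cons v rest ih =>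
      intro gaps
      cases gaps with
      | nil => simp [joinB]
      | cons gap gaps => simp [joinB, ih]

/-- After the first gap is taken out, enough space remains for the remaining gaps. -/
lemma spare_space (g s : Int) (hg : 1 ≤ g) (hs : g ≤ s) :
    g - 1 ≤ s - PySem.Int.floordiv s g := by
  rw [PySem.Int.floordiv_eq_ediv_of_pos (by omega)]
  have hq := Int.ediv_add_emod s g
  have hr0 : 0 ≤ s % g := Int.emod_nonneg s (by omega)
  have hq1 : 1 ≤ s / g := (Int.le_ediv_iff_mul_le (by omega)).mpr (by omega)
  nlinarith [mul_nonneg (show (0:Int) ≤ g - 1 by omega) (show (0:Int) ≤ s / g - 1 by omega)]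

/-- The closed-form gap list satisfies A's recurrence: its head is s // g and its tail is the
    gap list for the reduced state. -/
lemma gapsB_cons (g s : Int) (hg : 1 ≤ g) (hs : g ≤ s) :
    gapsB g s = PySem.Int.floordiv s g :: gapsB (g - 1) (s - PySem.Int.floordiv s g) := by
  have hg0 : (0 : Int) < g := by omega
  have hq : g * (s / g) + s % g = s := Int.ediv_add_emod s g
  have hr0 : 0 ≤ s % g := Int.emod_nonneg s (by omega)
  have hr1 : s % g < g := Int.emod_lt_of_pos s hg0
  rw [PySem.Int.floordiv_eq_ediv_of_pos hg0]
  by_cases hone : g = 1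
  · subst hone
    have hrm : PySem.Int.mod s 1 = 0 := by
      rw [PySem.Int.mod_eq_emod_of_pos (by norm_num)]; omega
    have hdiv : s / 1 = s := Int.ediv_one s
    simp only [gapsB, if_neg (by norm_num : ¬ (1:Int) ≤ 0), if_pos (by norm_num : (1:Int) - 1 ≤ 0),
      hrm, PySem.Int.floordiv_eq_ediv_of_pos (by norm_num : (0:Int) < 1), hdiv,
      PySem.List.pyRange_one]
    norm_num [List.range_succ]
  · -- g ≥ 2
    have hg2 : 2 ≤ g := by omega
    have hg1 : (0 : Int) < g - 1 := by omega
    set q := s / g with hqdef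
    set r := s % g with hrdef
    have hq1 : 1 ≤ q := by rw [hqdef]; rw [Int.le_ediv_iff_mul_le hg0]; omega
    have hqr' : (s - q) / (g - 1) = (if r = g - 1 then q + 1 else q)
             ∧ (s - q) % (g - 1) = (if r = g - 1 then 0 else r) := by
      by_cases hcase : r = g - 1
      · rw [if_pos hcase, if_pos hcase]
        exact (Int.ediv_emod_unique hg1).mpr ⟨by linear_combination hq - hcase, le_refl 0, hg1⟩
      · rw [if_neg hcase, if_neg hcase]
        exact (Int.ediv_emod_unique hg1).mpr ⟨by linear_combination hq, hr0, by omega⟩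
    have hmodg : PySem.Int.mod s g = r := by rw [PySem.Int.mod_eq_emod_of_pos hg0]
    have hmodg' : PySem.Int.mod (s - q) (g - 1) = (if r = g - 1 then 0 else r) := by
      rw [PySem.Int.mod_eq_emod_of_pos hg1, hqr'.2]
    have hdivg' : PySem.Int.floordiv (s - q) (g - 1) = (if r = g - 1 then q + 1 else q) := by
      rw [PySem.Int.floordiv_eq_ediv_of_pos hg1, hqr'.1]
    simp only [gapsB, if_neg (by omega : ¬ g ≤ 0), if_neg (by omega : ¬ g - 1 ≤ 0),
      PySem.Int.floordiv_eq_ediv_of_pos hg0, hmodg, hmodg', hdivg',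
      PySem.List.pyRange_one]
    rw [show (g - 0).toNat = (g - 1).toNat + 1 by omega, List.range_succ_eq_map]
    simp only [List.map_cons, List.map_map, List.cons_append]
    rw [show (g - 1 - 0).toNat = (g - 1).toNat by omega]
    refine List.cons_eq_cons.mpr ⟨?_, ?_⟩
    · have hc : ¬ (g ≤ r) := by omega
      simp [hc, ← hqdef]
    · rw [List.append_left_inj]
      refine List.map_congr_left ?_
      intro k hk
      have hk' : (k : Int) < g - 1 := by
        have := List.mem_range.mp hk; omega
      simp only [Function.comp]
      by_cases hcase : r = g - 1
      · rw [if_pos hcase]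
        have c1 : g - r ≤ 0 + ((k : Int) + 1) := by omega
        have c2 : ¬ (g - 1 - 0 ≤ 0 + (k : Int)) := by omega
        push_cast
        rw [if_pos (by push_cast; omega), if_neg (by push_cast; omega)]
        ring
      · rw [if_neg hcase]
        push_cast
        by_cases hc : g - r ≤ (k : Int) + 1
        · rw [if_pos (by push_cast; omega), if_pos (by push_cast; omega)]
        · rw [if_neg (by push_cast; omega), if_neg (by push_cast; omega)]

lemma runA_eq_joinB (vs : List String) : ∀ (g s : Int),
    g = (vs.length : Int) - 1 → g ≤ s → runA vs g s = joinB vs (gapsB g s) := by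
  induction vs with
  | nil => intro g s _ _; simp [runA, joinB]
  | cons v rest ih =>
      intro g s hg hs
      cases rest with
      | nil =>
          have hg0 : g = 0 := by simp at hg; omega
          subst hg0
          simp only [runA, gapsB]
          norm_num
          simp [joinB]
      | cons w rest' =>
          have hg1 : 1 ≤ g := by simp at hg; omega
          rw [gapsB_cons g s hg1 hs, runA, joinB]
          rw [if_neg (by simp; omega : ¬ ((g == 0) = true))]
          rw [ih (g - 1) (s - PySem.Int.floordiv s g) (by simp at hg ⊢; omega)
              (spare_space g s hg1 hs)]

lemma ports_eq (values : List String) (max_len : Int) (pad_before pad_after : Bool)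
    (hpre : Pre_distribute_padded values max_len pad_before pad_after) :
    distribute_padded values max_len pad_before pad_after
      = distribute_padded_alt values max_len pad_before pad_after := by
  unfold Pre_distribute_padded at hpre
  unfold distribute_padded distribute_padded_alt
  simp only [PySem.List.len_eq]
  rw [foldl_enum_runA, List.nil_append, flatMap_zip_joinB]
  have hlen : ((if pad_after then (if pad_before then "" :: values else values) ++ [""]
                 else (if pad_before then "" :: values else values)).length : Int)
      = (values.length : Int) + (if pad_before then 1 else 0) + (if pad_after then 1 else 0) := by
    cases pad_before <;> cases pad_after <;> simp <;> omega
  have hsum : ((if pad_after then (if pad_before then "" :: values else values) ++ [""]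
                 else (if pad_before then "" :: values else values)).map
                (fun v => PySem.Str.len v)).sum = (values.map (fun v => PySem.Str.len v)).sum := by
    cases pad_before <;> cases pad_after <;>
      simp [PySem.Str.len_eq]
  rw [runA_eq_joinB _ _ _ rfl (by rw [hlen, hsum]; omega)]
  rfl

-- ===== VERDICT (by name: the statement is the Claim_ definition above) =====
theorem distribute_padded_spec : Claim_equal_distribute_padded := by
  intro values max_len pad_before pad_after _hdom hpre
  exact ports_eq values max_len pad_before pad_after hpre
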